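-- pv_equiv track=rewrite | github.com/pwittlinger/resource-bpm-autonomy | src/scheduler/slack_analysis.py | _accumulated_slack_per_instance
-- ===== SOURCE A (Python) =====
-- SlackMap = dict[str, dict[str, int]]
--
-- CriticalTaskMap = dict[str, list[str]]
--
-- def _accumulated_slack_per_instance(
--     predecessor_slack: SlackMap,
--     critical_tasks: CriticalTaskMap,
-- ) -> dict[str, int]:
--     """Sum predecessor-slack over critical tasks only for every instance."""
--     return {
--         instance_id: sum(
--             slack
--             for task, slack in task_slack.items()
--             if task in critical_tasks.get(instance_id, [])
--         )
--         for instance_id, task_slack in predecessor_slack.items()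
--     }
-- ===== SOURCE B (Python) =====
-- def _accumulated_slack_per_instance(predecessor_slack, critical_tasks):
--     """Sum predecessor-slack over critical tasks only for every instance.
--
--     Inverted traversal: walk the instance's critical-task list with a running
--     'seen' set (so a duplicated critical task counts once) and accumulate each
--     task's slack via a dict lookup with default 0, instead of scanning the
--     slack entries and filtering by membership in the critical list.
--     """
--     result = {}
--     for instance_id, task_slack in predecessor_slack.items():
--         total = 0
--         seen = set()
--         for task in critical_tasks.get(instance_id, []):
--             if task not in seen:
--                 seen.add(task)
--                 total += task_slack.get(task, 0)
--         result[instance_id] = total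
--     return result
-- ===== Notes on version B (the rewrite author's own statement) =====
-- stated objective: alternative
-- what changed: Inverts the traversal: instead of scanning every slack entry and testing membership in the critical-task list, B walks the instance's critical-task list once with a running seen-set (counting each distinct critical task once) and accumulates its slack via a dict lookup with default 0, so the inner membership scan disappears.
import Mathlib
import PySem

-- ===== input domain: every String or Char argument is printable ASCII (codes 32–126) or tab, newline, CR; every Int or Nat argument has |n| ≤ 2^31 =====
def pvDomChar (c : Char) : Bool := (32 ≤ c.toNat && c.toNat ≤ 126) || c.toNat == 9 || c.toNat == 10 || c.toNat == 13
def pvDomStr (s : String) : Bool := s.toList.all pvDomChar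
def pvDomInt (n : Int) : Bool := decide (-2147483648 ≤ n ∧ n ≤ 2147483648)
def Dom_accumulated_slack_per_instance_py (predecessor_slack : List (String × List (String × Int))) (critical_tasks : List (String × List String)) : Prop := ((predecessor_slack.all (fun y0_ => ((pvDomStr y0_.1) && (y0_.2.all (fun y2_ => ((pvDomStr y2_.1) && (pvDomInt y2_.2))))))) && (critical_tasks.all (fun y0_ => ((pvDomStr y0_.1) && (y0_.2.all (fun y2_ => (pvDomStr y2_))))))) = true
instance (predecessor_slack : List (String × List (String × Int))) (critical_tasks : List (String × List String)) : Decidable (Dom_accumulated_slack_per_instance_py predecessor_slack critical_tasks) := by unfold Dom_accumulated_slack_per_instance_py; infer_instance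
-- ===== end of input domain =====

-- B inverts the traversal: it walks each instance's critical-task list once with a
-- running seen-set and accumulates slack via dict lookups, instead of scanning the
-- slack entries and filtering by membership.  Return values are proved equal on Pre_.

-- ===== PORT A =====
def accumulated_slack_per_instance_py (predecessor_slack : List (String × List (String × Int))) (critical_tasks : List (String × List String)) : List (String × Int) :=
  predecessor_slack.map (fun p =>
    (p.1, p.2.foldl (fun acc q =>
        if ((PySem.Dict.mk critical_tasks).getD p.1 []).contains q.1 then acc + q.2 else acc) 0))

-- ===== PORT B =====
-- the inner 'for task in critical_tasks.get(...)' loop with its running seen-set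
def pvAltTotal (task_slack : PySem.Dict String Int) : List String → PySem.Set String → Int → Int
  | [], _, total => total
  | t :: rest, seen, total =>
      if PySem.Set.contains seen t then pvAltTotal task_slack rest seen total
      else pvAltTotal task_slack rest (PySem.Set.add seen t) (total + task_slack.getD t 0)

def accumulated_slack_per_instance_py_alt (predecessor_slack : List (String × List (String × Int))) (critical_tasks : List (String × List String)) : List (String × Int) :=
  match predecessor_slack with
  | [] => []
  | (iid, ts) :: rest =>
      (iid, pvAltTotal (PySem.Dict.mk ts) ((PySem.Dict.mk critical_tasks).getD iid []) PySem.Set.empty 0)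
        :: accumulated_slack_per_instance_py_alt rest critical_tasks

-- ===== PRECONDITION & SPEC =====
-- Pre_ only requires that the association lists encode genuine Python dicts (distinct
-- keys): a list with a duplicated key corresponds to no dict input of the Python programs.
def Pre_accumulated_slack_per_instance_py (predecessor_slack : List (String × List (String × Int))) (critical_tasks : List (String × List String)) : Prop :=
  (predecessor_slack.map Prod.fst).Nodup ∧
  (∀ p ∈ predecessor_slack, (p.2.map Prod.fst).Nodup) ∧
  (critical_tasks.map Prod.fst).Nodup
instance (predecessor_slack : List (String × List (String × Int))) (critical_tasks : List (String × List String)) : Decidable (Pre_accumulated_slack_per_instance_py predecessor_slack critical_tasks) := by unfold Pre_accumulated_slack_per_instance_py; infer_instance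

def pvWitness_accumulated_slack_per_instance_py : (List (String × List (String × Int))) × (List (String × List String)) :=
  ([("i1", [("t1", 2), ("t2", 3)]), ("i2", [("t1", 7)])], [("i1", ["t1", "t9"])])

def Spec_accumulated_slack_per_instance_py (predecessor_slack : List (String × List (String × Int))) (critical_tasks : List (String × List String)) (out : List (String × Int)) : Prop := out = accumulated_slack_per_instance_py_alt predecessor_slack critical_tasks
instance (predecessor_slack : List (String × List (String × Int))) (critical_tasks : List (String × List String)) (out : List (String × Int)) : Decidable (Spec_accumulated_slack_per_instance_py predecessor_slack critical_tasks out) := by unfold Spec_accumulated_slack_per_instance_py; infer_instance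

-- ===== CLAIM (what is proved, stated in full; the proofs are below) =====
def Claim_equal_accumulated_slack_per_instance_py : Prop := ∀ (predecessor_slack : List (String × List (String × Int))) (critical_tasks : List (String × List String)), Dom_accumulated_slack_per_instance_py predecessor_slack critical_tasks → Pre_accumulated_slack_per_instance_py predecessor_slack critical_tasks → Spec_accumulated_slack_per_instance_py predecessor_slack critical_tasks (accumulated_slack_per_instance_py predecessor_slack critical_tasks)

-- ===== LEMMAS AND PROOFS =====

-- the keys pvAltTotal actually processes: c's elements not in seen, first occurrences
def pvNewKeys : PySem.Set String → List String → List String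
  | _, [] => []
  | seen, t :: rest =>
      if PySem.Set.contains seen t then pvNewKeys seen rest
      else t :: pvNewKeys (PySem.Set.add seen t) rest

theorem contains_iff_mem (s : PySem.Set String) (x : String) :
    PySem.Set.contains s x = true ↔ x ∈ s := by
  simp [PySem.Set.contains]

theorem mem_add (s : PySem.Set String) (x y : String) :
    y ∈ PySem.Set.add s x ↔ y ∈ s ∨ y = x := by
  unfold PySem.Set.add
  split <;> rename_i h
  · rw [contains_iff_mem] at h
    constructor
    · exact fun hy => Or.inl hy
    · rintro (hy | rfl) <;> [exact hy; exact h]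
  · simp [or_comm]

theorem mem_pvNewKeys (c : List String) :
    ∀ (seen : PySem.Set String) (x : String),
      x ∈ pvNewKeys seen c ↔ x ∈ c ∧ x ∉ seen := by
  induction c with
  | nil => intro seen x; simp [pvNewKeys]
  | cons t rest ih =>
    intro seen x
    unfold pvNewKeys
    split <;> rename_i h
    · rw [contains_iff_mem] at h
      rw [ih]
      constructor
      · rintro ⟨hr, hs⟩; exact ⟨List.mem_cons_of_mem _ hr, hs⟩
      · rintro ⟨hc, hs⟩
        rcases List.mem_cons.mp hc with rfl | hr
        · exact absurd h hs
        · exact ⟨hr, hs⟩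
    · have h' : t ∉ seen := fun hm => h ((contains_iff_mem seen t).mpr hm)
      rw [List.mem_cons, ih, mem_add]
      constructor
      · rintro (rfl | ⟨hr, hs⟩)
        · exact ⟨List.mem_cons_self, h'⟩
        · rw [not_or] at hs
          exact ⟨List.mem_cons_of_mem _ hr, hs.1⟩
      · rintro ⟨hc, hs⟩
        rcases List.mem_cons.mp hc with rfl | hr
        · exact Or.inl rfl
        · by_cases hx : x = t
          · exact Or.inl hx
          · exact Or.inr ⟨hr, fun hm => hm.elim hs hx⟩

theorem nodup_pvNewKeys (c : List String) :
    ∀ (seen : PySem.Set String), (pvNewKeys seen c).Nodup := by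
  induction c with
  | nil => intro _; simp [pvNewKeys]
  | cons t rest ih =>
    intro seen
    unfold pvNewKeys
    split
    · exact ih seen
    · refine List.nodup_cons.mpr ⟨?_, ih _⟩
      intro hm
      exact ((mem_pvNewKeys rest _ t).mp hm).2 ((mem_add seen t t).mpr (Or.inr rfl))

theorem pvAltTotal_eq (d : PySem.Dict String Int) (c : List String) :
    ∀ (seen : PySem.Set String) (total : Int),
      pvAltTotal d c seen total
        = total + ((pvNewKeys seen c).map (fun t => d.getD t 0)).sum := by
  induction c with
  | nil => intro seen total; simp [pvAltTotal, pvNewKeys]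
  | cons t rest ih =>
    intro seen total
    unfold pvAltTotal pvNewKeys
    split
    · exact ih seen total
    · rw [ih, List.map_cons, List.sum_cons]
      ring

-- A's filtered fold is the sum over the slack entries whose task is critical.
theorem foldA_eq_sum (ts : List (String × Int)) (c : List String) (a : Int) :
    ts.foldl (fun acc q => if c.contains q.1 then acc + q.2 else acc) a
      = a + ((ts.filter (fun q => c.contains q.1)).map (·.2)).sum := by
  induction ts generalizing a with
  | nil => simp
  | cons q ts ih =>
    rw [List.foldl_cons, List.filter_cons]
    cases h : c.contains q.1
    · rw [if_neg Bool.false_ne_true, if_neg Bool.false_ne_true, ih]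
    · rw [if_pos rfl, if_pos rfl, ih, List.map_cons, List.sum_cons]
      ring

theorem getD_mk_nil (k : String) : (PySem.Dict.mk ([] : List (String × Int))).getD k 0 = 0 := rfl

theorem get?_mk_of_not_mem (l : List (String × Int)) (k : String)
    (h : k ∉ l.map Prod.fst) : (PySem.Dict.mk l).get? k = none := by
  induction l with
  | nil => rfl
  | cons q l ih =>
    simp only [List.map_cons, List.mem_cons, not_or] at h
    rw [show (q : String × Int) = (q.1, q.2) from rfl, PySem.Dict.get?_mk_cons]
    simp only [beq_iff_eq]
    rw [if_neg (by exact fun hq => h.1 hq.symm)]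
    exact ih h.2

theorem sum_map_ite (k : String) (v : Int) (g : String → Int) (hg : g k = 0) :
    ∀ (S : List String), S.Nodup →
    (S.map (fun t => if k == t then v else g t)).sum
      = (if S.contains k then v else 0) + (S.map g).sum := by
  intro S
  induction S with
  | nil => simp
  | cons s S ih =>
    intro hS
    rcases List.nodup_cons.mp hS with ⟨hs, hS'⟩
    simp only [List.map_cons, List.sum_cons, List.contains_cons]
    cases hb : (k == s)
    · have hmap := ih hS'
      simp only [Bool.false_or, Bool.false_eq_true, if_false, hmap]
      ring
    · have hk : k = s := by simpa using hb
      subst hk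
      have hmap : S.map (fun t => if k == t then v else g t) = S.map g := by
        apply List.map_congr_left
        intro t ht
        have hf : (k == t) = false := by
          simpa using fun hh : k = t => hs (hh ▸ ht)
        simp [hf]
      simp only [Bool.true_or, if_true, hmap, hg]
      ring

theorem key_lemma (S : List String) (hS : S.Nodup) :
    ∀ (ts : List (String × Int)), (ts.map Prod.fst).Nodup →
    ((ts.filter (fun q => S.contains q.1)).map (·.2)).sum
      = (S.map (fun t => (PySem.Dict.mk ts).getD t 0)).sum := by
  intro ts
  induction ts with
  | nil => intro _; simp [getD_mk_nil]
  | cons q ts ih =>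
    intro hnd
    simp only [List.map_cons, List.nodup_cons] at hnd
    have hgetD : ∀ t, (PySem.Dict.mk (q :: ts)).getD t 0
        = if q.1 == t then q.2 else (PySem.Dict.mk ts).getD t 0 := by
      intro t
      rw [PySem.Dict.getD_eq_get?_getD, show (q : String × Int) = (q.1, q.2) from rfl,
        PySem.Dict.get?_mk_cons]
      by_cases h : q.1 == t
      · simp [h]
      · simp [h, PySem.Dict.getD_eq_get?_getD]
    have hq0 : (PySem.Dict.mk ts).getD q.1 0 = 0 := by
      rw [PySem.Dict.getD_eq_get?_getD, get?_mk_of_not_mem ts q.1 hnd.1]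
      rfl
    rw [List.map_congr_left (fun t _ => hgetD t),
      sum_map_ite q.1 q.2 (fun t => (PySem.Dict.mk ts).getD t 0) hq0 S hS,
      ← ih hnd.2, List.filter_cons]
    cases h : S.contains q.1 <;> simp

theorem contains_newKeys (c : List String) (x : String) :
    (pvNewKeys PySem.Set.empty c).contains x = c.contains x := by
  rw [Bool.eq_iff_iff]
  simp only [List.contains_iff_mem]
  rw [mem_pvNewKeys]
  simp [PySem.Set.empty]

-- ===== VERDICT (by name: the statement is the Claim_ definition above) =====
theorem accumulated_slack_per_instance_py_spec : Claim_equal_accumulated_slack_per_instance_py := by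
  intro ps ct hdom hpre
  rcases hpre with ⟨-, hinner, -⟩
  clear hdom
  unfold Spec_accumulated_slack_per_instance_py
  induction ps with
  | nil => rfl
  | cons p rest ih =>
    have hrest : accumulated_slack_per_instance_py rest ct
        = accumulated_slack_per_instance_py_alt rest ct :=
      ih (fun q hq => hinner q (List.mem_cons_of_mem _ hq))
    obtain ⟨iid, ts⟩ := p
    show (iid, _) :: accumulated_slack_per_instance_py rest ct = _
    unfold accumulated_slack_per_instance_py_alt
    rw [hrest]
    congr 1
    have hnd := hinner (iid, ts) List.mem_cons_self
    set c := (PySem.Dict.mk ct).getD iid ([] : List String) with hc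
    set S := pvNewKeys PySem.Set.empty c with hS
    rw [Prod.ext_iff]
    refine ⟨rfl, ?_⟩
    show ts.foldl (fun acc q => if c.contains q.1 then acc + q.2 else acc) 0
      = pvAltTotal (PySem.Dict.mk ts) c PySem.Set.empty 0
    rw [foldA_eq_sum, zero_add, pvAltTotal_eq, zero_add,
      List.filter_congr (fun q _ => (contains_newKeys c q.1).symm)]
    exact key_lemma S (nodup_pvNewKeys c _) ts hnd
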